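-- pv_equiv track=rewrite | github.com/Racro/efficientids_flax | analyze_profile_tpu.py | _categorize_kernel
-- ===== SOURCE A (Python) =====
-- from typing import Dict, List, Any, Tuple, Optional
--
-- def _categorize_kernel(kernel_name: str, event: Optional[Dict] = None) -> str:
--     """Categorize kernel by operation type."""
--     name_lower = kernel_name.lower()
--
--     # TPU HLO operations
--     if 'fusion' in name_lower:
--         return 'Fusion'
--     elif 'copy-start' in name_lower or 'copy-done' in name_lower:
--         return 'Copy'
--     elif 'all-reduce' in name_lower or 'all-gather' in name_lower or 'reduce-scatter' in name_lower:
--         return 'Collective'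
--     elif 'jit_train_step' in name_lower or 'jit_' in name_lower:
--         return 'JIT Entry'
--     elif 'convert' in name_lower:
--         return 'Convert'
--     elif 'reduce' in name_lower:
--         return 'Reduce'
--     elif 'clamp' in name_lower:
--         return 'Clamp'
--     elif 'bitcast' in name_lower:
--         return 'Bitcast'
--
--     # Check metadata first
--     if event:
--         args = event.get('args', {})
--         full_name = args.get('name', '').lower()
--         if full_name:
--             if 'attention' in full_name or 'attn' in full_name:
--                 return 'Attention'
--             elif 'ffn' in full_name or 'mlp' in full_name:
--                 return 'FFN/MLP'
--             elif 'embed' in full_name: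
--                 return 'Embeddings'
--             elif 'norm' in full_name:
--                 return 'Normalization'
--
--     # Fallback to kernel name patterns
--     if any(x in name_lower for x in ['qkv', 'query', 'key', 'value', 'attention', 'attn']):
--         return 'Attention'
--     elif any(x in name_lower for x in ['ffn', 'mlp', 'feedforward']):
--         return 'FFN/MLP'
--     elif any(x in name_lower for x in ['embed', 'vocab', 'lm_head']):
--         return 'Embeddings'
--     elif any(x in name_lower for x in ['softmax', 'layernorm', 'rmsnorm']):
--         return 'Normalization'
--     elif any(x in name_lower for x in ['add', 'mul', 'gelu', 'relu', 'silu']):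
--         return 'Elementwise'
--     elif 'gemm' in name_lower or 'dot' in name_lower:
--         return 'GEMM'
--
--     return 'Other'
-- ===== SOURCE B (Python) =====
-- from typing import Dict, Optional
--
-- # Flat scored rule table: (priority, from_kernel_name, substring, label).
-- # B scores every rule against its text, collects ALL matching rules, and
-- # returns the label of the minimum-priority match (argmin) instead of an
-- # ordered short-circuit if/elif chain.
-- _RULES = [
--     (0, True, 'fusion', 'Fusion'),
--     (1, True, 'copy-start', 'Copy'),
--     (2, True, 'copy-done', 'Copy'),
--     (3, True, 'all-reduce', 'Collective'),
--     (4, True, 'all-gather', 'Collective'),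
--     (5, True, 'reduce-scatter', 'Collective'),
--     (6, True, 'jit_train_step', 'JIT Entry'),
--     (7, True, 'jit_', 'JIT Entry'),
--     (8, True, 'convert', 'Convert'),
--     (9, True, 'reduce', 'Reduce'),
--     (10, True, 'clamp', 'Clamp'),
--     (11, True, 'bitcast', 'Bitcast'),
--     (12, False, 'attention', 'Attention'),
--     (13, False, 'attn', 'Attention'),
--     (14, False, 'ffn', 'FFN/MLP'),
--     (15, False, 'mlp', 'FFN/MLP'),
--     (16, False, 'embed', 'Embeddings'),
--     (17, False, 'norm', 'Normalization'),
--     (18, True, 'qkv', 'Attention'),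
--     (19, True, 'query', 'Attention'),
--     (20, True, 'key', 'Attention'),
--     (21, True, 'value', 'Attention'),
--     (22, True, 'attention', 'Attention'),
--     (23, True, 'attn', 'Attention'),
--     (24, True, 'ffn', 'FFN/MLP'),
--     (25, True, 'mlp', 'FFN/MLP'),
--     (26, True, 'feedforward', 'FFN/MLP'),
--     (27, True, 'embed', 'Embeddings'),
--     (28, True, 'vocab', 'Embeddings'),
--     (29, True, 'lm_head', 'Embeddings'),
--     (30, True, 'softmax', 'Normalization'),
--     (31, True, 'layernorm', 'Normalization'),
--     (32, True, 'rmsnorm', 'Normalization'),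
--     (33, True, 'add', 'Elementwise'),
--     (34, True, 'mul', 'Elementwise'),
--     (35, True, 'gelu', 'Elementwise'),
--     (36, True, 'relu', 'Elementwise'),
--     (37, True, 'silu', 'Elementwise'),
--     (38, True, 'gemm', 'GEMM'),
--     (39, True, 'dot', 'GEMM'),
-- ]
--
--
-- def _categorize_kernel(kernel_name: str, event: Optional[Dict] = None) -> str:
--     name_lower = kernel_name.lower()
--     full_name = (event or {}).get('args', {}).get('name', '').lower()
--     candidates = [(prio, label) for prio, from_kernel, pat, label in _RULES
--                   if pat in (name_lower if from_kernel else full_name)]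
--     return min(candidates)[1] if candidates else 'Other'
-- ===== Notes on version B (the rewrite author's own statement) =====
-- stated objective: alternative
-- what changed: Replaces A's ordered if/elif short-circuit chains by one flat scored rule table (priority, source-text, substring, label): B collects ALL matching rules into a candidate list and returns the label of the minimum-priority match, instead of returning at the first hit.
import Mathlib
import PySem

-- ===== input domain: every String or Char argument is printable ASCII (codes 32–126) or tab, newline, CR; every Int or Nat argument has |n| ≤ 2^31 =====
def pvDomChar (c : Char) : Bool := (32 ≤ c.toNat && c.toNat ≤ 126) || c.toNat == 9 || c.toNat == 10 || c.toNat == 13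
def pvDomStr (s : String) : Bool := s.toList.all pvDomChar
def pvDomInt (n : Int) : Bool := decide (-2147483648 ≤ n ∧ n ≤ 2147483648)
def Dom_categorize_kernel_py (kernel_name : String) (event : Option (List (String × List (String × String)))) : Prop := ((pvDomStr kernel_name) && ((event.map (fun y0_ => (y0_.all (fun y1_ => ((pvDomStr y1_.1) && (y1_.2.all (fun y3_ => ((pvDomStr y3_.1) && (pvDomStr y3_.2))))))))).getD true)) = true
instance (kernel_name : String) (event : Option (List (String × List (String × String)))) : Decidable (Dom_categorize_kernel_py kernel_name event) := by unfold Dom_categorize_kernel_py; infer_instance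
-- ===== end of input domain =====

-- B replaces A's ordered if/elif short-circuit chain by a flat scored rule table:
-- it collects ALL matching (priority, label) pairs and returns the argmin; same
-- behaviour, no speed claim.

-- ===== PORT A =====
-- literal transliteration of A's if/elif chains; dict.get → PySem.Dict.getD on Dict.mk
def categorize_kernel_py (kernel_name : String) (event : Option (List (String × List (String × String)))) : String :=
  let nl := PySem.Str.lower kernel_name
  if PySem.Str.isIn "fusion" nl then "Fusion"
  else if PySem.Str.isIn "copy-start" nl || PySem.Str.isIn "copy-done" nl then "Copy"
  else if PySem.Str.isIn "all-reduce" nl || PySem.Str.isIn "all-gather" nl || PySem.Str.isIn "reduce-scatter" nl then "Collective"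
  else if PySem.Str.isIn "jit_train_step" nl || PySem.Str.isIn "jit_" nl then "JIT Entry"
  else if PySem.Str.isIn "convert" nl then "Convert"
  else if PySem.Str.isIn "reduce" nl then "Reduce"
  else if PySem.Str.isIn "clamp" nl then "Clamp"
  else if PySem.Str.isIn "bitcast" nl then "Bitcast"
  else
    -- 'if event:' — truthy iff present and non-empty; early return modelled as Option
    let metaRes : Option String :=
      match event with
      | none => none
      | some ev =>
        if ev = [] then none
        else
          let args := PySem.Dict.getD (PySem.Dict.mk ev) "args" []
          let full := PySem.Str.lower (PySem.Dict.getD (PySem.Dict.mk args) "name" "")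
          if full = "" then none
          else if PySem.Str.isIn "attention" full || PySem.Str.isIn "attn" full then some "Attention"
          else if PySem.Str.isIn "ffn" full || PySem.Str.isIn "mlp" full then some "FFN/MLP"
          else if PySem.Str.isIn "embed" full then some "Embeddings"
          else if PySem.Str.isIn "norm" full then some "Normalization"
          else none
    match metaRes with
    | some r => r
    | none =>
      if ["qkv", "query", "key", "value", "attention", "attn"].any (fun x => PySem.Str.isIn x nl) then "Attention"
      else if ["ffn", "mlp", "feedforward"].any (fun x => PySem.Str.isIn x nl) then "FFN/MLP"
      else if ["embed", "vocab", "lm_head"].any (fun x => PySem.Str.isIn x nl) then "Embeddings"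
      else if ["softmax", "layernorm", "rmsnorm"].any (fun x => PySem.Str.isIn x nl) then "Normalization"
      else if ["add", "mul", "gelu", "relu", "silu"].any (fun x => PySem.Str.isIn x nl) then "Elementwise"
      else if PySem.Str.isIn "gemm" nl || PySem.Str.isIn "dot" nl then "GEMM"
      else "Other"

-- ===== PORT B =====
-- flat scored rule table: (priority, from_kernel_name, pattern, label)
def pvRules : List (Int × Bool × String × String) :=
  [(0, true, "fusion", "Fusion"),
   (1, true, "copy-start", "Copy"),
   (2, true, "copy-done", "Copy"),
   (3, true, "all-reduce", "Collective"),
   (4, true, "all-gather", "Collective"),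
   (5, true, "reduce-scatter", "Collective"),
   (6, true, "jit_train_step", "JIT Entry"),
   (7, true, "jit_", "JIT Entry"),
   (8, true, "convert", "Convert"),
   (9, true, "reduce", "Reduce"),
   (10, true, "clamp", "Clamp"),
   (11, true, "bitcast", "Bitcast"),
   (12, false, "attention", "Attention"),
   (13, false, "attn", "Attention"),
   (14, false, "ffn", "FFN/MLP"),
   (15, false, "mlp", "FFN/MLP"),
   (16, false, "embed", "Embeddings"),
   (17, false, "norm", "Normalization"),
   (18, true, "qkv", "Attention"),
   (19, true, "query", "Attention"),
   (20, true, "key", "Attention"),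
   (21, true, "value", "Attention"),
   (22, true, "attention", "Attention"),
   (23, true, "attn", "Attention"),
   (24, true, "ffn", "FFN/MLP"),
   (25, true, "mlp", "FFN/MLP"),
   (26, true, "feedforward", "FFN/MLP"),
   (27, true, "embed", "Embeddings"),
   (28, true, "vocab", "Embeddings"),
   (29, true, "lm_head", "Embeddings"),
   (30, true, "softmax", "Normalization"),
   (31, true, "layernorm", "Normalization"),
   (32, true, "rmsnorm", "Normalization"),
   (33, true, "add", "Elementwise"),
   (34, true, "mul", "Elementwise"),
   (35, true, "gelu", "Elementwise"),
   (36, true, "relu", "Elementwise"),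
   (37, true, "silu", "Elementwise")  ,
   (38, true, "gemm", "GEMM"),
   (39, true, "dot", "GEMM")]

-- Python's min over (int, str) tuples: lexicographic, first of equals kept
def pvMinPair (acc : Int × String) : List (Int × String) → Int × String
  | [] => acc
  | x :: xs => pvMinPair (if x.1 < acc.1 ∨ (x.1 = acc.1 ∧ x.2 < acc.2) then x else acc) xs

def categorize_kernel_py_alt (kernel_name : String) (event : Option (List (String × List (String × String)))) : String :=
  let nl := PySem.Str.lower kernel_name
  let full := PySem.Str.lower
    (PySem.Dict.getD (PySem.Dict.mk (PySem.Dict.getD (PySem.Dict.mk (event.getD [])) "args" [])) "name" "")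
  let candidates := pvRules.filterMap (fun r =>
    if PySem.Str.isIn r.2.2.1 (if r.2.1 then nl else full) then some (r.1, r.2.2.2) else none)
  match candidates with
  | [] => "Other"
  | c :: cs => (pvMinPair c cs).2

-- ===== PRECONDITION & SPEC =====
def Spec_categorize_kernel_py (kernel_name : String) (event : Option (List (String × List (String × String)))) (out : String) : Prop := out = categorize_kernel_py_alt kernel_name event
instance (kernel_name : String) (event : Option (List (String × List (String × String)))) (out : String) : Decidable (Spec_categorize_kernel_py kernel_name event out) := by unfold Spec_categorize_kernel_py; infer_instance

-- ===== CLAIM (what is proved, stated in full; the proofs are below) =====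
def Claim_equal_categorize_kernel_py : Prop := ∀ (kernel_name : String) (event : Option (List (String × List (String × String)))), Dom_categorize_kernel_py kernel_name event → Spec_categorize_kernel_py kernel_name event (categorize_kernel_py kernel_name event)

-- ===== LEMMAS AND PROOFS =====

-- proof-only view of B's candidate/argmin computation over an arbitrary rule suffix
def pvEval (nl full : String) (rules : List (Int × Bool × String × String)) : String :=
  match rules.filterMap (fun r =>
    if PySem.Str.isIn r.2.2.1 (if r.2.1 then nl else full) then some (r.1, r.2.2.2) else none) with
  | [] => "Other"
  | c :: cs => (pvMinPair c cs).2

theorem minPair_of_lt (a : Int × String) (l : List (Int × String)) (h : ∀ x ∈ l, a.1 < x.1) :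
    pvMinPair a l = a := by
  induction l with
  | nil => rfl
  | cons x xs ih =>
    have hx := h x (by simp)
    rw [pvMinPair, if_neg (by rintro (h1 | ⟨h2, _⟩) <;> omega)]
    exact ih fun y hy => h y (by simp [hy])

theorem pvEval_cons (nl full : String) (pr : Int) (src : Bool) (pat lbl : String)
    (rest : List (Int × Bool × String × String)) (hrest : ∀ r ∈ rest, pr < r.1) :
    pvEval nl full ((pr, src, pat, lbl) :: rest) =
      if PySem.Str.isIn pat (if src then nl else full) then lbl else pvEval nl full rest := by
  unfold pvEval
  rw [List.filterMap_cons]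
  by_cases hc : PySem.Str.isIn pat (if src then nl else full) = true
  · simp only [hc, if_pos]
    rw [minPair_of_lt]
    intro x hx
    rcases List.mem_filterMap.mp hx with ⟨r, hr, hfr⟩
    by_cases h2 : PySem.Str.isIn r.2.2.1 (if r.2.1 then nl else full) = true
    · rw [if_pos h2] at hfr; cases hfr; exact hrest r hr
    · rw [if_neg h2] at hfr; cases hfr
  · simp only [hc, Bool.false_eq_true, if_false]

theorem alt_eq_eval (kernel_name : String) (event : Option (List (String × List (String × String)))) :
    categorize_kernel_py_alt kernel_name event =
      pvEval (PySem.Str.lower kernel_name)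
        (PySem.Str.lower (PySem.Dict.getD (PySem.Dict.mk
          (PySem.Dict.getD (PySem.Dict.mk (event.getD [])) "args" [])) "name" ""))
        pvRules := rfl

theorem pv_if_or (a b : Bool) (x y : String) :
    (if (a || b) = true then x else y) = if a = true then x else if b = true then x else y := by
  cases a <;> cases b <;> simp

set_option maxHeartbeats 1600000 in
theorem pvEval_chain (nl full : String) :
    pvEval nl full pvRules =
      (if PySem.Str.isIn "fusion" nl then "Fusion"
      else if PySem.Str.isIn "copy-start" nl || PySem.Str.isIn "copy-done" nl then "Copy"
      else if PySem.Str.isIn "all-reduce" nl || PySem.Str.isIn "all-gather" nl || PySem.Str.isIn "reduce-scatter" nl then "Collective"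
      else if PySem.Str.isIn "jit_train_step" nl || PySem.Str.isIn "jit_" nl then "JIT Entry"
      else if PySem.Str.isIn "convert" nl then "Convert"
      else if PySem.Str.isIn "reduce" nl then "Reduce"
      else if PySem.Str.isIn "clamp" nl then "Clamp"
      else if PySem.Str.isIn "bitcast" nl then "Bitcast"
      else if PySem.Str.isIn "attention" full || PySem.Str.isIn "attn" full then "Attention"
      else if PySem.Str.isIn "ffn" full || PySem.Str.isIn "mlp" full then "FFN/MLP"
      else if PySem.Str.isIn "embed" full then "Embeddings"
      else if PySem.Str.isIn "norm" full then "Normalization"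
      else if ["qkv", "query", "key", "value", "attention", "attn"].any (fun x => PySem.Str.isIn x nl) then "Attention"
      else if ["ffn", "mlp", "feedforward"].any (fun x => PySem.Str.isIn x nl) then "FFN/MLP"
      else if ["embed", "vocab", "lm_head"].any (fun x => PySem.Str.isIn x nl) then "Embeddings"
      else if ["softmax", "layernorm", "rmsnorm"].any (fun x => PySem.Str.isIn x nl) then "Normalization"
      else if ["add", "mul", "gelu", "relu", "silu"].any (fun x => PySem.Str.isIn x nl) then "Elementwise"
      else if PySem.Str.isIn "gemm" nl || PySem.Str.isIn "dot" nl then "GEMM"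
      else "Other") := by
  unfold pvRules
  rw [pvEval_cons _ _ _ _ _ _ _ (by decide), pvEval_cons _ _ _ _ _ _ _ (by decide),
      pvEval_cons _ _ _ _ _ _ _ (by decide), pvEval_cons _ _ _ _ _ _ _ (by decide),
      pvEval_cons _ _ _ _ _ _ _ (by decide), pvEval_cons _ _ _ _ _ _ _ (by decide),
      pvEval_cons _ _ _ _ _ _ _ (by decide), pvEval_cons _ _ _ _ _ _ _ (by decide),
      pvEval_cons _ _ _ _ _ _ _ (by decide), pvEval_cons _ _ _ _ _ _ _ (by decide),
      pvEval_cons _ _ _ _ _ _ _ (by decide), pvEval_cons _ _ _ _ _ _ _ (by decide),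
      pvEval_cons _ _ _ _ _ _ _ (by decide), pvEval_cons _ _ _ _ _ _ _ (by decide),
      pvEval_cons _ _ _ _ _ _ _ (by decide), pvEval_cons _ _ _ _ _ _ _ (by decide),
      pvEval_cons _ _ _ _ _ _ _ (by decide), pvEval_cons _ _ _ _ _ _ _ (by decide),
      pvEval_cons _ _ _ _ _ _ _ (by decide), pvEval_cons _ _ _ _ _ _ _ (by decide),
      pvEval_cons _ _ _ _ _ _ _ (by decide), pvEval_cons _ _ _ _ _ _ _ (by decide),
      pvEval_cons _ _ _ _ _ _ _ (by decide), pvEval_cons _ _ _ _ _ _ _ (by decide),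
      pvEval_cons _ _ _ _ _ _ _ (by decide), pvEval_cons _ _ _ _ _ _ _ (by decide),
      pvEval_cons _ _ _ _ _ _ _ (by decide), pvEval_cons _ _ _ _ _ _ _ (by decide),
      pvEval_cons _ _ _ _ _ _ _ (by decide), pvEval_cons _ _ _ _ _ _ _ (by decide),
      pvEval_cons _ _ _ _ _ _ _ (by decide), pvEval_cons _ _ _ _ _ _ _ (by decide),
      pvEval_cons _ _ _ _ _ _ _ (by decide), pvEval_cons _ _ _ _ _ _ _ (by decide),
      pvEval_cons _ _ _ _ _ _ _ (by decide), pvEval_cons _ _ _ _ _ _ _ (by decide),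
      pvEval_cons _ _ _ _ _ _ _ (by decide), pvEval_cons _ _ _ _ _ _ _ (by decide),
      pvEval_cons _ _ _ _ _ _ _ (by decide), pvEval_cons _ _ _ _ _ _ _ (by decide)]
  simp only [if_true, pv_if_or, List.any_cons, List.any_nil, Bool.or_false]
  rfl

theorem pv_match_getD (o : Option String) (fb : String) :
    (match o with | some r => r | none => fb) = o.getD fb := by cases o <;> rfl

theorem pv_getD_ite (c : Prop) [Decidable c] (x y : Option String) (d : String) :
    ((if c then x else y).getD d) = if c then x.getD d else y.getD d := by
  split_ifs <;> rfl

theorem pv_meta_empty : (PySem.Str.isIn "attention" "" = false) ∧ (PySem.Str.isIn "attn" "" = false) ∧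
    (PySem.Str.isIn "ffn" "" = false) ∧ (PySem.Str.isIn "mlp" "" = false) ∧
    (PySem.Str.isIn "embed" "" = false) ∧ (PySem.Str.isIn "norm" "" = false) := by decide

set_option maxHeartbeats 1600000 in
theorem alt_eq (kernel_name : String) (event : Option (List (String × List (String × String)))) :
    categorize_kernel_py kernel_name event = categorize_kernel_py_alt kernel_name event := by
  obtain ⟨m1, m2, m3, m4, m5, m6⟩ := pv_meta_empty
  rw [alt_eq_eval, pvEval_chain]
  unfold categorize_kernel_py
  cases event with
  | none =>
    have h : PySem.Str.lower (PySem.Dict.getD (PySem.Dict.mk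
        (PySem.Dict.getD (PySem.Dict.mk ((none : Option (List (String × List (String × String)))).getD [])) "args" [])) "name" "") = "" := by decide
    rw [h]
    simp only [m1, m2, m3, m4, m5, m6, Bool.or_self, Bool.false_eq_true, if_false]
  | some ev =>
    have hsome : ((some ev).getD ([] : List (String × List (String × String)))) = ev := rfl
    rw [hsome]
    simp only [pv_match_getD]
    by_cases hev : ev = []
    · subst hev
      have h : PySem.Str.lower (PySem.Dict.getD (PySem.Dict.mk
          (PySem.Dict.getD (PySem.Dict.mk ([] : List (String × List (String × String)))) "args" [])) "name" "") = "" := by decide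
      rw [h]
      simp only [if_true, Option.getD_none, m1, m2, m3, m4, m5, m6,
        Bool.or_self, Bool.false_eq_true, if_false]
    · simp only [if_neg hev]
      generalize PySem.Str.lower (PySem.Dict.getD (PySem.Dict.mk
        (PySem.Dict.getD (PySem.Dict.mk ev) "args" [])) "name" "") = fs
      by_cases hfs : fs = ""
      · subst hfs
        simp only [Option.getD_none, m1, m2, m3, m4, m5, m6,
          Bool.or_self, Bool.false_eq_true, if_false, if_true]
      · simp only [if_neg hfs, pv_getD_ite, Option.getD_some, Option.getD_none]

-- ===== VERDICT (by name: the statement is the Claim_ definition above) =====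
theorem categorize_kernel_py_spec : Claim_equal_categorize_kernel_py := by
  intro kn ev _
  unfold Spec_categorize_kernel_py
  exact alt_eq kn ev
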